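-- pv_equiv track=rewrite | github.com/tronprotocol/wallet-cli | qa/lib/case_resolver.py | unresolved_tokens
-- ===== SOURCE A (Python) =====
-- def unresolved_tokens(tokens):
--     missing = []
--     for token in tokens:
--         start = 0
--         while True:
--             open_idx = token.find("{{", start)
--             if open_idx < 0:
--                 break
--             close_idx = token.find("}}", open_idx + 2)
--             if close_idx < 0:
--                 break
--             missing.append(token[open_idx:close_idx + 2])
--             start = close_idx + 2
--     return missing
-- ===== SOURCE B (Python) =====
-- def unresolved_tokens(tokens):
--     missing = []
--     for token in tokens:
--         buf = None          # chars of the placeholder being collected; None = outside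
--         prev_open = False   # previous char was '{' while outside
--         for ch in token:
--             if buf is None:
--                 if prev_open and ch == "{":
--                     buf = ["{", "{"]
--                     prev_open = False
--                 else:
--                     prev_open = ch == "{"
--             else:
--                 buf.append(ch)
--                 if ch == "}" and len(buf) >= 4 and buf[-2] == "}":
--                     missing.append("".join(buf))
--                     buf = None
--     return missing
-- ===== Notes on version B (the rewrite author's own statement) =====
-- stated objective: alternative
-- what changed: A repeatedly calls str.find('{{', start)/str.find('}}', ...) and slices the token, while B makes a single character-at-a-time pass per token with an explicit state machine (outside / collecting a placeholder buffer) and never calls find or slices.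
import Mathlib
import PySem

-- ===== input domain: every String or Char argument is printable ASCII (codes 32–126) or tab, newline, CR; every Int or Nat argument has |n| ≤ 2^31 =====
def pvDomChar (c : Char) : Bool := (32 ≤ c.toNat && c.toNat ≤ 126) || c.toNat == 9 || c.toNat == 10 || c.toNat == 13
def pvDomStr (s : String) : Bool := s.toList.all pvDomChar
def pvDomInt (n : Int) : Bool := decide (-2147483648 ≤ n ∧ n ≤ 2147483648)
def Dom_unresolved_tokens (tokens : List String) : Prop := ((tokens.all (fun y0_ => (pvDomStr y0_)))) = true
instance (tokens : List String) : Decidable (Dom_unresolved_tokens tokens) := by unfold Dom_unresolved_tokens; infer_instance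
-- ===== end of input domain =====

-- B replaces A's repeated str.find scans with a single character-at-a-time state machine
-- (idiomatic one-pass scan); same return value, no side effects in either version.

-- ===== PORT A =====
-- the 'while True' loop of A; fuel bounds the iteration count (each iteration advances
-- start by at least 4, so token.length + 1 iterations always suffice — a totality guard only)
def loopA (token : String) : Nat → Int → List String → List String
  | 0, _, missing => missing
  | fuel + 1, start, missing =>
    let open_idx := PySem.Str.findFrom token "{{" start
    if open_idx < 0 then missing
    else
      let close_idx := PySem.Str.findFrom token "}}" (open_idx + 2)
      if close_idx < 0 then missing
      else loopA token fuel (close_idx + 2)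
        (missing ++ [PySem.Str.slice token (some open_idx) (some (close_idx + 2))])

def unresolved_tokens (tokens : List String) : List String :=
  tokens.foldl (fun missing token => loopA token (token.toList.length + 1) 0 missing) []

-- ===== PORT B =====
-- one pass over the characters: buf = the placeholder being collected (none = outside),
-- prevOpen = "previous char was '{' while outside"; mirrors Source B's inner for-loop
def scanB : List Char → Option (List Char) → Bool → List String → List String
  | [], _, _, missing => missing
  | ch :: rest, none, prevOpen, missing =>
      if prevOpen && (ch == '{') then scanB rest (some ['{', '{']) false missing
      else scanB rest none (ch == '{') missing
  | ch :: rest, some b, prevOpen, missing =>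
      let b' := b ++ [ch]
      if ch == '}' && decide (4 ≤ b'.length) && (PySem.List.pyGet? b' (-2) == some '}')
      then scanB rest none prevOpen (missing ++ [String.ofList b'])
      else scanB rest (some b') prevOpen missing

def unresolved_tokens_alt (tokens : List String) : List String :=
  tokens.foldl (fun missing token => scanB token.toList none false missing) []

-- ===== PRECONDITION & SPEC =====
def Spec_unresolved_tokens (tokens : List String) (out : List String) : Prop := out = unresolved_tokens_alt tokens
instance (tokens : List String) (out : List String) : Decidable (Spec_unresolved_tokens tokens out) := by unfold Spec_unresolved_tokens; infer_instance

-- ===== CLAIM (what is proved, stated in full; the proofs are below) =====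
def Claim_equal_unresolved_tokens : Prop := ∀ (tokens : List String), Dom_unresolved_tokens tokens → Spec_unresolved_tokens tokens (unresolved_tokens tokens)

-- ===== LEMMAS AND PROOFS =====

-- reference scanner both ports are reduced to: grab collects a placeholder body up to the
-- first "}}", scan finds each "{{" and emits "{{" ++ body
def grab : List Char → List Char → Option (List Char × List Char)
  | [], _ => none
  | [_], _ => none
  | c1 :: c2 :: rest, acc =>
      if c1 = '}' ∧ c2 = '}' then some (acc ++ ['}', '}'], rest)
      else grab (c2 :: rest) (acc ++ [c1])

lemma grab_length : ∀ (l acc c r), grab l acc = some (c, r) → r.length + 2 ≤ l.length := by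
  intro l acc c r h
  induction l, acc using grab.induct generalizing c r with
  | case1 => simp [grab] at h
  | case2 => simp [grab] at h
  | case3 c1 c2 rest acc hcc =>
      rw [grab, if_pos hcc] at h
      cases h; simp
  | case4 c1 c2 rest acc hcc ih =>
      rw [grab, if_neg hcc] at h
      have := ih _ _ h
      simpa using Nat.le_succ_of_le this

def scan : List Char → List (List Char)
  | '{' :: '{' :: rest =>
      (match h : grab rest [] with
        | none => []
        | some (content, rest') => ('{' :: '{' :: content) :: scan rest')
  | _ :: rest => scan rest
  | [] => []
termination_by l => l.length
decreasing_by
  · have := grab_length rest [] content rest' h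
    simp; omega
  all_goals simp

lemma grab_none : ∀ (l acc : List Char), ¬ ['}', '}'] <:+: l → grab l acc = none := by
  intro l acc h
  induction l, acc using grab.induct with
  | case1 => rfl
  | case2 => rfl
  | case3 c1 c2 rest acc hcc =>
      exact absurd (List.IsPrefix.isInfix ⟨rest, by simp [hcc.1, hcc.2]⟩) h
  | case4 c1 c2 rest acc hcc ih =>
      rw [grab, if_neg hcc]
      exact ih (fun hi => h (List.infix_cons hi))

lemma grab_found : ∀ (n : Nat) (l acc : List Char),
    ['}', '}'] <+: l.drop n → (∀ i < n, ¬ ['}', '}'] <+: l.drop i) →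
    grab l acc = some (acc ++ l.take (n + 2), l.drop (n + 2)) := by
  intro n
  induction n with
  | zero =>
      intro l acc hpre _
      obtain ⟨t, ht⟩ := hpre
      simp only [List.drop_zero] at ht
      subst ht
      simp only [List.cons_append, List.nil_append]
      rw [grab, if_pos ⟨rfl, rfl⟩]
      simp
  | succ n ih =>
      intro l acc hpre hmin
      match l with
      | [] => simp at hpre
      | [c] => simp at hpre
      | c1 :: c2 :: rest =>
          have h0 : ¬ ['}', '}'] <+: c1 :: c2 :: rest := hmin 0 (by omega)
          have hcc : ¬ (c1 = '}' ∧ c2 = '}') := by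
            rintro ⟨rfl, rfl⟩
            exact h0 ⟨rest, rfl⟩
          rw [grab, if_neg hcc]
          rw [ih (c2 :: rest) (acc ++ [c1]) (by simpa using hpre)
            (fun i hi => by simpa using hmin (i + 1) (by omega))]
          simp

lemma scan_nil : scan [] = [] := by rw [scan.eq_def]

lemma scan_cons (c : Char) (rest : List Char) (h : ¬ ['{', '{'] <+: c :: rest) :
    scan (c :: rest) = scan rest := by
  rw [scan.eq_def]
  split
  · rename_i heq
    rw [heq] at h
    exact absurd ⟨_, rfl⟩ h
  · rename_i x hd tl hne heq
    cases heq
    rfl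
  · rename_i heq
    cases heq

lemma scan_no_open : ∀ (l : List Char), ¬ ['{', '{'] <:+: l → scan l = [] := by
  intro l
  induction l with
  | nil => intro _; exact scan_nil
  | cons c rest ih =>
      intro h
      rw [scan_cons c rest (fun hp => h hp.isInfix)]
      exact ih (fun hi => h (List.infix_cons hi))

lemma scan_skip : ∀ (n : Nat) (l : List Char),
    (∀ i < n, ¬ ['{', '{'] <+: l.drop i) → scan l = scan (l.drop n) := by
  intro n
  induction n with
  | zero => intro l _; simp
  | succ n ih =>
      intro l hmin
      match l with
      | [] => simp
      | c :: rest =>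
          rw [scan_cons c rest (by simpa using hmin 0 (by omega))]
          rw [ih rest (fun i hi => by simpa using hmin (i + 1) (by omega))]
          simp

lemma pyGet?_snoc_neg_two (x : List Char) (c : Char) :
    PySem.List.pyGet? (x ++ [c]) (-2) = x.getLast? := by
  cases x using List.reverseRecOn with
  | nil => simp [PySem.List.pyGet?, PySem.List.pyIdx?]
  | append_singleton y d => simp [PySem.List.pyGet?, PySem.List.pyIdx?]

-- the close test of scanB, evaluated on a buffer "{{" ++ X ++ [ch]
lemma closes_eval (X : List Char) (ch : Char) :
    (ch == '}' && decide (4 ≤ (('{' :: '{' :: X) ++ [ch]).length)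
      && (PySem.List.pyGet? (('{' :: '{' :: X) ++ [ch]) (-2) == some '}'))
    = (ch == '}' && (X.getLast? == some '}')) := by
  rw [pyGet?_snoc_neg_two]
  cases X using List.reverseRecOn with
  | nil => simp
  | append_singleton y d =>
      have h1 : ('{' :: '{' :: (y ++ [d])).getLast? = some d := by
        rw [show ('{' :: '{' :: (y ++ [d])) = ('{' :: '{' :: y) ++ [d] by simp]
        exact List.getLast?_concat
      have h2 : (y ++ [d]).getLast? = some d := List.getLast?_concat
      simp [h1, h2, List.length_append]

-- the same test on a buffer ("{{" ++ X ++ [d]) ++ [ch]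
lemma closes_eval₂ (X : List Char) (d ch : Char) :
    (ch == '}' && decide (4 ≤ ((('{' :: '{' :: X) ++ [d]) ++ [ch]).length)
      && (PySem.List.pyGet? ((('{' :: '{' :: X) ++ [d]) ++ [ch]) (-2) == some '}'))
    = (ch == '}' && (d == '}')) := by
  rw [pyGet?_snoc_neg_two]
  have h2 : ('{' :: (X ++ [d])).getLast? = some d := by
    rw [show ('{' :: (X ++ [d])) = ('{' :: X) ++ [d] by simp]
    exact List.getLast?_concat
  simp [h2, List.length_append]

lemma scanB_grab : ∀ (l acc : List Char) (p : Bool) (missing : List String),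
    (acc.getLast? = some '}' → l.head? ≠ some '}') →
    scanB l (some ('{' :: '{' :: acc)) p missing =
      (match grab l acc with
        | none => missing
        | some (content, rest) =>
            scanB rest none p (missing ++ [String.ofList ('{' :: '{' :: content)])) := by
  intro l acc p missing h
  induction l, acc using grab.induct generalizing p missing with
  | case1 acc => rfl
  | case2 c acc =>
      have hcond : (c == '}' && (acc.getLast? == some '}')) = false := by
        cases hg : acc.getLast? with
        | none => simp
        | some d =>
            by_cases hd : d = '}'
            · subst hd
              have := h hg
              simp at this
              simp [this]
            · simp [hd]
      show scanB [c] (some ('{' :: '{' :: acc)) p missing = missing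
      rw [scanB]
      rw [closes_eval acc c, hcond]
      simp [scanB]
  | case3 c1 c2 rest acc hcc =>
      obtain ⟨rfl, rfl⟩ := hcc
      have hlast : (acc.getLast? == some '}') = false := by
        cases hg : acc.getLast? with
        | none => simp
        | some d =>
            have := h
            rw [hg] at this
            by_cases hd : d = '}'
            · subst hd; simp at this
            · simp [hd]
      rw [grab, if_pos ⟨rfl, rfl⟩]
      rw [scanB]
      rw [closes_eval acc '}', hlast]
      simp only [Bool.and_false, Bool.false_eq_true, if_false]
      rw [scanB]
      rw [closes_eval₂ acc '}' '}']
      simp only [BEq.rfl, Bool.and_self, if_true]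
      congr 2
      simp
  | case4 c1 c2 rest acc hcc ih =>
      have hcond : (c1 == '}' && (acc.getLast? == some '}')) = false := by
        cases hg : acc.getLast? with
        | none => simp
        | some d =>
            by_cases hd : d = '}'
            · subst hd
              have := h hg
              simp at this
              simp [this]
            · simp [hd]
      rw [grab, if_neg hcc]
      rw [scanB]
      rw [closes_eval acc c1, hcond]
      simp only [Bool.false_eq_true, if_false]
      exact ih p missing (by
        intro hg
        simp at hg
        subst hg
        intro hh
        simp at hh
        exact hcc ⟨rfl, hh⟩)

lemma scan_open_none (rest : List Char) (h : grab rest [] = none) :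
    scan ('{' :: '{' :: rest) = [] := by
  rw [scan.eq_def]
  split
  · rename_i heq
    cases heq
    split
    · rfl
    · rename_i h2; rw [h] at h2; cases h2
  · rename_i hne heq
    cases heq
    exact (hne rest rfl rfl).elim
  · rename_i heq; cases heq

lemma scan_open_some (rest content rest' : List Char) (h : grab rest [] = some (content, rest')) :
    scan ('{' :: '{' :: rest) = ('{' :: '{' :: content) :: scan rest' := by
  rw [scan.eq_def]
  split
  · rename_i heq
    cases heq
    split
    · rename_i h2; rw [h] at h2; cases h2
    · rename_i c r h2
      rw [h] at h2
      cases h2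
      rfl
  · rename_i hne heq
    cases heq
    exact (hne rest rfl rfl).elim
  · rename_i heq; cases heq

lemma scan_empty_pad (p : Bool) : scan (if p then ['{'] else []) = [] := by
  cases p
  · exact scan_nil
  · simp only [if_pos]
    rw [scan_cons '{' [] (by simp)]
    exact scan_nil

lemma scan_pad (p : Bool) (c : Char) (rest : List Char) (h : ¬(p = true ∧ c = '{')) :
    scan ((if p then ['{'] else []) ++ c :: rest)
      = scan ((if (c == '{') then ['{'] else []) ++ rest) := by
  cases p with
  | false =>
      simp only [Bool.false_eq_true, if_false, List.nil_append]
      by_cases hc : c = '{'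
      · subst hc; simp
      · rw [scan_cons c rest (by simp; exact fun h => absurd h.symm hc),
          if_neg (by simpa using hc)]
        simp
  | true =>
      have hc : c ≠ '{' := fun hc => h ⟨rfl, hc⟩
      simp only [if_pos, List.singleton_append]
      rw [scan_cons '{' (c :: rest) (by simp; exact fun h => absurd h.symm hc),
        scan_cons c rest (by simp; exact fun h => absurd h.symm hc),
        if_neg (by simpa using hc)]
      simp

lemma scanB_scan : ∀ (n : Nat) (l : List Char), l.length ≤ n → ∀ (p : Bool) (missing : List String),
    scanB l none p missing =
      missing ++ (scan ((if p then ['{'] else []) ++ l)).map String.ofList := by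
  intro n
  induction n with
  | zero =>
      intro l hl p missing
      have : l = [] := List.eq_nil_of_length_eq_zero (Nat.le_zero.mp hl)
      subst this
      simp [scanB, scan_empty_pad]
  | succ n ih =>
      intro l hl p missing
      match l with
      | [] => simp [scanB, scan_empty_pad]
      | c :: rest =>
          rw [scanB]
          by_cases hpc : p = true ∧ c = '{'
          · obtain ⟨rfl, rfl⟩ := hpc
            rw [if_pos (by simp)]
            rw [scanB_grab rest [] false missing (by simp)]
            cases hg : grab rest [] with
            | none =>
                rw [show ((if (true : Bool) then ['{'] else []) ++ '{' :: rest)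
                    = '{' :: '{' :: rest by simp]
                rw [scan_open_none rest hg]
                simp
            | some pr =>
                obtain ⟨content, rest'⟩ := pr
                rw [show ((if (true : Bool) then ['{'] else []) ++ '{' :: rest)
                    = '{' :: '{' :: rest by simp]
                rw [scan_open_some rest content rest' hg]
                dsimp only
                have hlen : rest'.length ≤ n := by
                  have := grab_length rest [] content rest' hg
                  simp at hl
                  omega
                rw [ih rest' hlen false (missing ++ [String.ofList ('{' :: '{' :: content)])]
                simp
          · have hcond : (p && (c == '{')) = false := by
              cases p
              · simp
              · have : c ≠ '{' := fun hc => hpc ⟨rfl, hc⟩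
                simp [this]
            rw [hcond]
            simp only [Bool.false_eq_true, if_false]
            rw [ih rest (by simp at hl; omega) (c == '{') missing]
            rw [scan_pad p c rest hpc]

lemma loopA_eq (token : String) : ∀ (fuel start : Nat),
    start ≤ token.toList.length → token.toList.length - start + 1 ≤ fuel →
    ∀ missing, loopA token fuel (start : Int) missing =
      missing ++ (scan (token.toList.drop start)).map String.ofList := by
  intro fuel
  induction fuel with
  | zero => intro start h1 h2 _; omega
  | succ fuel ih =>
      intro start hstart hfuel missing
      rw [loopA]
      rw [PySem.Str.findFrom_eq, show ("{{" : String).toList = ['{', '{'] by decide]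
      rw [PySem.Chars.findFrom_natCast token.toList ['{', '{'] start hstart]
      by_cases h1 : PySem.Chars.find (token.toList.drop start) ['{', '{'] = -1
      · rw [if_pos h1]
        rw [if_pos (by norm_num : (-1 : Int) < 0)]
        rw [scan_no_open _ ((PySem.Chars.find_eq_neg_one_iff _ _).mp h1)]
        simp
      · rw [if_neg h1]
        have hge : 0 ≤ PySem.Chars.find (token.toList.drop start) ['{', '{'] := by
          have := PySem.Chars.neg_one_le_find (token.toList.drop start) ['{', '{']
          omega
        obtain ⟨hpre1, hmin1⟩ := PySem.Chars.find_spec (s := token.toList.drop start)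
          (sub := ['{', '{']) hge
        obtain ⟨trest, htrest⟩ := hpre1
        rw [if_neg (by omega)]
        have hdd : ((token.toList.drop start).drop
            (PySem.Chars.find (token.toList.drop start) ['{', '{']).toNat)
            = token.toList.drop (start + (PySem.Chars.find (token.toList.drop start) ['{', '{']).toNat) := by
          rw [List.drop_drop]
        rw [hdd] at htrest
        have hlen2 : start + (PySem.Chars.find (token.toList.drop start) ['{', '{']).toNat + 2
            ≤ token.toList.length := by
          have := congrArg List.length htrest
          simp only [List.length_append, List.length_drop, List.length_cons,
            List.length_nil] at this
          omega
        rw [PySem.Str.findFrom_eq, show ("}}" : String).toList = ['}', '}'] by decide]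
        rw [show (↑start + PySem.Chars.find (token.toList.drop start) ['{', '{'] + 2 : Int)
            = ((start + (PySem.Chars.find (token.toList.drop start) ['{', '{']).toNat + 2 : Nat) : Int) by
          push_cast; omega]
        rw [PySem.Chars.findFrom_natCast token.toList ['}', '}'] _ hlen2]
        have htr : trest = token.toList.drop
            (start + (PySem.Chars.find (token.toList.drop start) ['{', '{']).toNat + 2) := by
          have h' : (['{', '{'] ++ trest).drop 2 = trest := by simp
          rw [htrest] at h'
          rw [List.drop_drop] at h'
          rw [← h']
        by_cases h2 : PySem.Chars.find (token.toList.drop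
            (start + (PySem.Chars.find (token.toList.drop start) ['{', '{']).toNat + 2)) ['}', '}'] = -1
        · rw [if_pos h2]
          rw [if_pos (by norm_num : (-1 : Int) < 0)]
          rw [scan_skip (PySem.Chars.find (token.toList.drop start) ['{', '{']).toNat
            (token.toList.drop start) hmin1, hdd, ← htrest]
          simp only [List.cons_append, List.nil_append]
          rw [scan_open_none trest (grab_none trest []
            ((PySem.Chars.find_eq_neg_one_iff _ _).mp (by rw [← htr] at h2; exact h2)))]
          simp
        · rw [if_neg h2]
          have hge2 : 0 ≤ PySem.Chars.find (token.toList.drop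
              (start + (PySem.Chars.find (token.toList.drop start) ['{', '{']).toNat + 2)) ['}', '}'] := by
            have := PySem.Chars.neg_one_le_find (token.toList.drop
              (start + (PySem.Chars.find (token.toList.drop start) ['{', '{']).toNat + 2)) ['}', '}']
            omega
          obtain ⟨hpre2, hmin2⟩ := PySem.Chars.find_spec (s := token.toList.drop
            (start + (PySem.Chars.find (token.toList.drop start) ['{', '{']).toNat + 2))
            (sub := ['}', '}']) hge2
          rw [if_neg (by omega)]
          rw [show ((start : Int) + PySem.Chars.find (token.toList.drop start) ['{', '{'])
              = ((start + (PySem.Chars.find (token.toList.drop start) ['{', '{']).toNat : Nat) : Int) by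
            push_cast; omega]
          rw [show (((start + (PySem.Chars.find (token.toList.drop start) ['{', '{']).toNat + 2 : Nat) : Int)
              + PySem.Chars.find (token.toList.drop
                (start + (PySem.Chars.find (token.toList.drop start) ['{', '{']).toNat + 2)) ['}', '}'] + 2)
              = ((start + (PySem.Chars.find (token.toList.drop start) ['{', '{']).toNat + 2
                + (PySem.Chars.find (token.toList.drop
                  (start + (PySem.Chars.find (token.toList.drop start) ['{', '{']).toNat + 2)) ['}', '}']).toNat
                + 2 : Nat) : Int) by
            push_cast; omega]
          obtain ⟨t2, ht2⟩ := hpre2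
          rw [List.drop_drop] at ht2
          have hns : start + (PySem.Chars.find (token.toList.drop start) ['{', '{']).toNat + 2
              + (PySem.Chars.find (token.toList.drop
                (start + (PySem.Chars.find (token.toList.drop start) ['{', '{']).toNat + 2)) ['}', '}']).toNat
              + 2 ≤ token.toList.length := by
            have := congrArg List.length ht2
            simp only [List.length_append, List.length_drop, List.length_cons,
              List.length_nil] at this
            omega
          rw [ih _ hns (by omega) _]
          rw [scan_skip (PySem.Chars.find (token.toList.drop start) ['{', '{']).toNat
            (token.toList.drop start) hmin1, hdd, ← htrest]
          simp only [List.cons_append, List.nil_append]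
          rw [scan_open_some trest _ _ (grab_found
            (PySem.Chars.find (token.toList.drop
              (start + (PySem.Chars.find (token.toList.drop start) ['{', '{']).toNat + 2)) ['}', '}']).toNat
            trest [] (by rw [htr, List.drop_drop]; exact ⟨t2, ht2⟩) (by rw [htr]; exact hmin2))]
          have hdrop2 : trest.drop
              ((PySem.Chars.find (token.toList.drop
                (start + (PySem.Chars.find (token.toList.drop start) ['{', '{']).toNat + 2)) ['}', '}']).toNat + 2)
              = token.toList.drop (start + (PySem.Chars.find (token.toList.drop start) ['{', '{']).toNat + 2
                + (PySem.Chars.find (token.toList.drop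
                  (start + (PySem.Chars.find (token.toList.drop start) ['{', '{']).toNat + 2)) ['}', '}']).toNat
                + 2) := by
            rw [htr, List.drop_drop]
            congr 1
          rw [hdrop2]
          have hslice : PySem.Str.slice token
              (some ((start + (PySem.Chars.find (token.toList.drop start) ['{', '{']).toNat : Nat) : Int))
              (some ((start + (PySem.Chars.find (token.toList.drop start) ['{', '{']).toNat + 2
                + (PySem.Chars.find (token.toList.drop
                  (start + (PySem.Chars.find (token.toList.drop start) ['{', '{']).toNat + 2)) ['}', '}']).toNat
                + 2 : Nat) : Int))
              = String.ofList ('{' :: '{' :: ([] ++ trest.take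
                ((PySem.Chars.find (token.toList.drop
                  (start + (PySem.Chars.find (token.toList.drop start) ['{', '{']).toNat + 2)) ['}', '}']).toNat + 2))) := by
            apply String.toList_inj.mp
            rw [PySem.Str.toList_slice, PySem.Chars.slice_eq_listSlice,
              PySem.List.slice_toNat _ (by positivity) (by positivity)]
            simp only [Int.toNat_natCast, String.toList_ofList, List.nil_append]
            rw [show (start + (PySem.Chars.find (token.toList.drop start) ['{', '{']).toNat + 2
                + (PySem.Chars.find (token.toList.drop
                  (start + (PySem.Chars.find (token.toList.drop start) ['{', '{']).toNat + 2)) ['}', '}']).toNat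
                + 2) - (start + (PySem.Chars.find (token.toList.drop start) ['{', '{']).toNat)
                = (PySem.Chars.find (token.toList.drop
                  (start + (PySem.Chars.find (token.toList.drop start) ['{', '{']).toNat + 2)) ['}', '}']).toNat
                  + 2 + 2 by omega]
            rw [← hdd, ← List.drop_drop, hdd, ← htrest]
            simp only [List.cons_append, List.nil_append, Nat.add_comm]
            rw [List.take_add]
            simp
          rw [hslice]
          simp

lemma per_token (token : String) (missing : List String) :
    loopA token (token.toList.length + 1) 0 missing = scanB token.toList none false missing := by
  have h1 := loopA_eq token (token.toList.length + 1) 0 (by omega) (by omega) missing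
  have h2 := scanB_scan token.toList.length token.toList (le_refl _) false missing
  rw [show ((0 : Nat) : Int) = (0 : Int) by simp] at h1
  rw [h1, h2]
  simp

-- ===== VERDICT (by name: the statement is the Claim_ definition above) =====
theorem unresolved_tokens_spec : Claim_equal_unresolved_tokens := by
  intro tokens _
  unfold Spec_unresolved_tokens unresolved_tokens unresolved_tokens_alt
  congr 1
  funext missing token
  exact per_token token missing
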